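-- pv_equiv track=rewrite | github.com/panadero51/sub-string | substringLarga.py | buscarSubstring
-- ===== SOURCE A (Python) =====
-- import string
--
-- def buscarSubstring(cad):
-- 	substring = ""
-- 	listaAux = []
-- 	substringLarga = ""
-- 	# Quitar signos de puntuación
-- 	cadena = ''.join([i for i in cad if i not in string.punctuation])
-- 	nuevaCadena = cadena.split()
--
-- 	# Ordenar las palabras de la string sin letras repetidas en una nueva lista
-- 	for palabras in nuevaCadena:
-- 		for letras in palabras:
-- 			if letras not in substring:
-- 				substring += letras
-- 		listaAux.append(substring)
-- 		substring = ""
--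
-- 	# Buscar en la lista creada la substring más larga
-- 	i = 0
-- 	for palabrasMod in listaAux:
-- 		if len(palabrasMod) > len(substringLarga):
-- 			substringLarga = palabrasMod
-- 		i += 1
-- 	return substringLarga
-- ===== SOURCE B (Python) =====
-- import string
--
-- def buscarSubstring(cad):
--     best = ""
--     cur = ""
--     for c in cad + " ":
--         if c in string.punctuation:
--             continue
--         if c.isspace():
--             if len(cur) > len(best):
--                 best = cur
--             cur = ""
--         elif c not in cur:
--             cur += c
--     return best
-- ===== Notes on version B (the rewrite author's own statement) =====
-- stated objective: simpler
-- what changed: B is a single character-level streaming state machine over the input (plus one sentinel space) maintaining (best, current word's dedup): it never builds the filtered string, the word list, or the list of per-word dedup strings that A materializes in four staged passes.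
import Mathlib
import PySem

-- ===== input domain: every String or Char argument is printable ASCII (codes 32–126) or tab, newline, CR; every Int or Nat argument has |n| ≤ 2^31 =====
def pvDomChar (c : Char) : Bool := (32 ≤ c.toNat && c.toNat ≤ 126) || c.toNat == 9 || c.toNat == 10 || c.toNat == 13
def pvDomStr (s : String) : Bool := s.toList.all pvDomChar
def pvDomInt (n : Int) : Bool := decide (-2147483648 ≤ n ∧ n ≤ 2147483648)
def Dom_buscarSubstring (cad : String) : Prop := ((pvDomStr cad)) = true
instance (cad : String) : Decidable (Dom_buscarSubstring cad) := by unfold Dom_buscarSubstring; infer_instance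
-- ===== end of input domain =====

-- B replaces A's four staged passes (filter punctuation, split into words, dedup every word,
-- scan for the longest) by one streaming character-level state machine; objective: simpler.

-- string.punctuation
def pyPunct : List Char := "!\"#$%&'()*+,-./:;<=>?@[\\]^_`{|}~".toList

-- ===== PORT A =====
def buscarSubstring (cad : String) : String :=
  -- cadena = ''.join([i for i in cad if i not in string.punctuation])
  let cadena : List Char := cad.toList.filter (fun i => !(pyPunct.contains i))
  -- nuevaCadena = cadena.split()
  let nuevaCadena : List (List Char) := PySem.Chars.split₀ cadena
  -- for palabras in nuevaCadena: build substring char by char, append to listaAux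
  let listaAux : List (List Char) :=
    nuevaCadena.foldl (fun acc palabras =>
      acc ++ [palabras.foldl
        (fun substring letras =>
          if substring.contains letras then substring else substring ++ [letras]) []]) []
  -- scan listaAux for the strictly longer string (the counter i of A is unused)
  let substringLarga : List Char :=
    listaAux.foldl (fun best p => if p.length > best.length then p else best) []
  String.ofList substringLarga

-- ===== PORT B =====
-- one pass over cad + " " with state (best, cur): skip punctuation, flush on whitespace,
-- otherwise extend cur's first-occurrence dedup
def buscarSubstring_alt (cad : String) : String :=
  let st : List Char × List Char :=
    (cad.toList ++ [' ']).foldl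
      (fun st c =>
        if pyPunct.contains c then st
        else if PySem.Chars.isspace c then
          (if st.2.length > st.1.length then (st.2, ([] : List Char)) else (st.1, []))
        else if st.2.contains c then st
        else (st.1, st.2 ++ [c])) ([], [])
  String.ofList st.1

-- ===== PRECONDITION & SPEC =====
def Spec_buscarSubstring (cad : String) (out : String) : Prop := out = buscarSubstring_alt cad
instance (cad : String) (out : String) : Decidable (Spec_buscarSubstring cad out) := by unfold Spec_buscarSubstring; infer_instance

-- ===== CLAIM (what is proved, stated in full; the proofs are below) =====
def Claim_equal_buscarSubstring : Prop := ∀ (cad : String), Dom_buscarSubstring cad → Spec_buscarSubstring cad (buscarSubstring cad)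

-- ===== LEMMAS AND PROOFS =====

-- B's step function, named for the proofs
def pvStep (st : List Char × List Char) (c : Char) : List Char × List Char :=
  if pyPunct.contains c then st
  else if PySem.Chars.isspace c then
    (if st.2.length > st.1.length then (st.2, ([] : List Char)) else (st.1, []))
  else if st.2.contains c then st
  else (st.1, st.2 ++ [c])

-- A's longest-scan step
def pvMax (best p : List Char) : List Char := if p.length > best.length then p else best

-- A's inner dedup loop is exactly PySem.Set.ofList
lemma inner_dedup (w : List Char) :
    w.foldl (fun substring letras =>
      if substring.contains letras then substring else substring ++ [letras]) []
    = PySem.Set.ofList w := by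
  rw [PySem.Set.ofList_eq_foldl]
  rfl

-- building listaAux by appending singletons is a map
lemma foldl_append_map {α β : Type} (f : α → β) (ws : List α) (acc : List β) :
    ws.foldl (fun a w => a ++ [f w]) acc = acc ++ ws.map f := by
  induction ws generalizing acc with
  | nil => simp
  | cons w t ih => simp [List.foldl_cons, ih]

-- B's step is the identity on punctuation, so the fold sees only the filtered chars
lemma foldl_step_filter (l : List Char) (st : List Char × List Char) :
    l.foldl pvStep st = (l.filter (fun c => !(pyPunct.contains c))).foldl pvStep st := by
  induction l generalizing st with
  | nil => rfl
  | cons c t ih =>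
    by_cases h : pyPunct.contains c = true
    · have h1 : pvStep st c = st := by unfold pvStep; rw [if_pos h]
      simp only [List.foldl_cons, h1, List.filter_cons, h, Bool.not_true,
        Bool.false_eq_true, if_false]
      exact ih st
    · simp only [List.foldl_cons, List.filter_cons,
        Bool.not_eq_eq_eq_not, Bool.not_true] at *
      simp only [h, Bool.not_false, if_pos, List.foldl_cons]
      exact ih (pvStep st c)

-- split₀.go's accumulator prepends already-emitted words
lemma go_acc (l cur : List Char) (acc : List (List Char)) :
    PySem.Chars.split₀.go l cur acc = acc.reverse ++ PySem.Chars.split₀.go l cur [] := by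
  induction l generalizing cur acc with
  | nil =>
    by_cases h : cur.isEmpty <;> simp [PySem.Chars.split₀.go, h]
  | cons c t ih =>
    by_cases h : PySem.Chars.isspace c = true
    · by_cases h2 : cur.isEmpty = true
      · simp only [PySem.Chars.split₀.go, h, h2, if_true]
        exact ih [] acc
      · have h2' : cur.isEmpty = false := by simpa using h2
        simp only [PySem.Chars.split₀.go, h, h2', if_true, Bool.false_eq_true, if_false]
        rw [ih [] (cur.reverse :: acc), ih [] [cur.reverse]]
        simp
    · have h' : PySem.Chars.isspace c = false := by simpa using h
      simp only [PySem.Chars.split₀.go, h', Bool.false_eq_true, if_false]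
      exact ih (c :: cur) acc

-- first-occurrence dedup extended by one character
lemma ofList_snoc (w : List Char) (c : Char) :
    PySem.Set.ofList (w ++ [c])
    = (if (PySem.Set.ofList w).contains c then PySem.Set.ofList w
       else PySem.Set.ofList w ++ [c]) := by
  rw [PySem.Set.ofList_eq_foldl, PySem.Set.ofList_eq_foldl, List.foldl_append]
  rfl

-- MAIN INVARIANT: on punctuation-free input, B's streaming fold computes A's
-- longest-scan over the dedups of the words split₀ produces.
lemma stream_eq (l : List Char) (hl : ∀ c ∈ l, pyPunct.contains c = false)
    (w : List Char) (best : List Char) :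
    ((l ++ [' ']).foldl pvStep (best, PySem.Set.ofList w)).1
    = ((PySem.Chars.split₀.go l w.reverse []).map PySem.Set.ofList).foldl pvMax best := by
  induction l generalizing w best with
  | nil =>
    simp only [List.nil_append, List.foldl_cons, List.foldl_nil]
    have hstep : pvStep (best, PySem.Set.ofList w) ' '
        = (pvMax best (PySem.Set.ofList w), PySem.Set.ofList []) := by
      unfold pvStep pvMax
      rw [if_neg (by decide : ¬(pyPunct.contains ' ' = true)),
          if_pos (by decide : PySem.Chars.isspace ' ' = true)]
      split <;> rfl
    rw [hstep]
    by_cases hw : w = []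
    · subst hw
      have : PySem.Set.ofList ([] : List Char) = [] := rfl
      simp [PySem.Chars.split₀.go, pvMax, this]
    · have h2 : w.reverse.isEmpty = false := by simp [hw]
      simp [PySem.Chars.split₀.go, h2, pvMax]
  | cons c t ih =>
    have hc : pyPunct.contains c = false := hl c (by simp)
    have ht : ∀ x ∈ t, pyPunct.contains x = false := fun x hx => hl x (by simp [hx])
    by_cases hsp : PySem.Chars.isspace c = true
    · -- whitespace: flush the current word
      have hstep : pvStep (best, PySem.Set.ofList w) c
          = (pvMax best (PySem.Set.ofList w), PySem.Set.ofList []) := by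
        unfold pvStep pvMax
        dsimp only
        rw [if_neg (by simpa using hc), if_pos hsp]
        split <;> rfl
      simp only [List.cons_append, List.foldl_cons, hstep]
      rw [ih ht [] _]
      simp only [List.reverse_nil]
      by_cases hw : w = []
      · subst hw
        simp only [PySem.Chars.split₀.go, hsp, if_true, List.reverse_nil,
          List.isEmpty_nil]
        have : pvMax best (PySem.Set.ofList []) = best := by
          unfold pvMax
          simp [show PySem.Set.ofList ([] : List Char) = [] from rfl]
        rw [this]
      · have h2 : w.reverse.isEmpty = false := by simp [hw]
        simp only [PySem.Chars.split₀.go, hsp, h2, if_true, Bool.false_eq_true,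
          if_false]
        rw [go_acc t [] [w.reverse.reverse]]
        simp only [List.reverse_reverse, List.reverse_cons, List.reverse_nil,
          List.nil_append, List.singleton_append, List.map_cons, List.foldl_cons]
    · -- a letter: extend the current word's dedup
      have hsp' : PySem.Chars.isspace c = false := by simpa using hsp
      have hstep : pvStep (best, PySem.Set.ofList w) c
          = (best, PySem.Set.ofList (w ++ [c])) := by
        unfold pvStep
        dsimp only
        rw [if_neg (by simpa using hc), if_neg (by simp [hsp']), ofList_snoc]
        by_cases hmem : c ∈ w
        · simp [hmem]
        · simp [hmem]
      simp only [List.cons_append, List.foldl_cons, hstep]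
      rw [ih ht (w ++ [c]) best]
      simp only [PySem.Chars.split₀.go, hsp', Bool.false_eq_true, if_false,
        List.reverse_append, List.reverse_cons, List.reverse_nil, List.nil_append,
        List.singleton_append]

-- ===== VERDICT (by name: the statement is the Claim_ definition above) =====
theorem buscarSubstring_spec : Claim_equal_buscarSubstring := by
  intro cad _
  show buscarSubstring cad = buscarSubstring_alt cad
  unfold buscarSubstring buscarSubstring_alt
  simp only [inner_dedup, foldl_append_map, List.nil_append]
  have hB : ((cad.toList ++ [' ']).foldl
      (fun st c =>
        if pyPunct.contains c then st
        else if PySem.Chars.isspace c then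
          (if st.2.length > st.1.length then (st.2, ([] : List Char)) else (st.1, []))
        else if st.2.contains c then st
        else (st.1, st.2 ++ [c])) (([] : List Char), ([] : List Char)))
      = (cad.toList ++ [' ']).foldl pvStep ([], PySem.Set.ofList []) := rfl
  rw [hB, foldl_step_filter]
  have hfil : (cad.toList ++ [' ']).filter (fun c => !(pyPunct.contains c))
      = cad.toList.filter (fun c => !(pyPunct.contains c)) ++ [' '] := by
    rw [List.filter_append]
    simp
    decide
  rw [hfil]
  have hnp : ∀ c ∈ cad.toList.filter (fun c => !(pyPunct.contains c)),
      pyPunct.contains c = false := by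
    intro c hc
    simpa using (List.of_mem_filter hc)
  have key := stream_eq (cad.toList.filter (fun c => !(pyPunct.contains c))) hnp [] []
  simp only [List.reverse_nil] at key
  rw [key]
  rfl
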